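-- pv_equiv track=rewrite | github.com/Amit33-design/Network-Automation | backend/design_engine.py | _make_leaf_labels
-- ===== SOURCE A (Python) =====
-- def _make_leaf_labels(leaf_count: int) -> list[str]:
--     """
--     Generate role-aware leaf hostnames given a count.
--     Distributes PROD/STOR/DEV labels proportionally.
--     e.g. 4 → [LEAF-PROD-01, LEAF-PROD-02, LEAF-STOR-01, LEAF-DEV-01]
--          8 → [LEAF-PROD-01..04, LEAF-STOR-01..02, LEAF-DEV-01..02]
--     """
--     if leaf_count <= 0:
--         return []
--     prod_n = max(1, leaf_count - (leaf_count // 4) - (leaf_count // 4))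
--     stor_n = max(1, leaf_count // 4)
--     dev_n  = max(1, leaf_count - prod_n - stor_n)
--     labels = (
--         [f"LEAF-PROD-{i:02d}" for i in range(1, prod_n + 1)] +
--         [f"LEAF-STOR-{i:02d}" for i in range(1, stor_n + 1)] +
--         [f"LEAF-DEV-{i:02d}"  for i in range(1, dev_n  + 1)]
--     )
--     # If rounding left us short/over, pad or trim to exact count
--     while len(labels) < leaf_count:
--         labels.append(f"LEAF-PROD-{len(labels)+1:02d}")
--     return labels[:leaf_count]
-- ===== SOURCE B (Python) =====
-- def _make_leaf_labels(leaf_count: int) -> list[str]: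
--     if leaf_count <= 0:
--         return []
--     prod_n = max(1, leaf_count - (leaf_count // 4) - (leaf_count // 4))
--     stor_n = max(1, leaf_count // 4)
--     return [
--         f"LEAF-PROD-{j + 1:02d}" if j < prod_n
--         else f"LEAF-STOR-{j - prod_n + 1:02d}" if j < prod_n + stor_n
--         else f"LEAF-DEV-{j - prod_n - stor_n + 1:02d}"
--         for j in range(leaf_count)
--     ]
-- ===== Notes on version B (the rewrite author's own statement) =====
-- stated objective: alternative
-- what changed: B replaces A's three per-role comprehensions + concatenation + pad-while-loop + trimming slice by one comprehension over range(leaf_count) that picks each label's role and within-role index from the position via thresholds, never building the over-long list.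
import Mathlib
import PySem

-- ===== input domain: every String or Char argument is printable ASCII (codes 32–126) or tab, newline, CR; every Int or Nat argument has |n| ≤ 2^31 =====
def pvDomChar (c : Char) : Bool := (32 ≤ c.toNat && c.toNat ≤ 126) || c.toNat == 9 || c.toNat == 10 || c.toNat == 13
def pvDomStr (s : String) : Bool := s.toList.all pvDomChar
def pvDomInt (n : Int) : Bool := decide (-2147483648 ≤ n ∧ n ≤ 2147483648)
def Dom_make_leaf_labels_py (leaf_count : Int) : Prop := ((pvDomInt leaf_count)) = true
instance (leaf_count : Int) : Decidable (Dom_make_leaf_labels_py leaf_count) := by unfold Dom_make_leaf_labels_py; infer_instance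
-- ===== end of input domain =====

-- B emits the labels in one pass over range(leaf_count), selecting each position's role by
-- thresholds (one comprehension), instead of A's three comprehensions + concatenation + pad loop + trimming slice
-- (objective: alternative decomposition; same asymptotic cost).

-- f"LEAF-<role>-{i:02d}" for i ≥ 1 (the only i either program formats) = str(i).zfill(2); exact there.
def pvFmt (role : String) (i : Int) : String :=
  "LEAF-" ++ role ++ "-" ++ PySem.Str.zfill (PySem.Int.toStr i) 2

-- ===== PORT A =====
-- the 'while len(labels) < leaf_count: labels.append(...)' loop
def padLoopA (leaf_count : Int) (labels : List String) : List String :=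
  if (labels.length : Int) < leaf_count then
    padLoopA leaf_count (labels ++ [pvFmt "PROD" ((labels.length : Int) + 1)])
  else labels
termination_by (leaf_count - labels.length).toNat
decreasing_by simp; omega

def make_leaf_labels_py (leaf_count : Int) : List String :=
  if leaf_count ≤ 0 then []
  else
    let prod_n := max 1 (leaf_count - PySem.Int.floordiv leaf_count 4 - PySem.Int.floordiv leaf_count 4)
    let stor_n := max 1 (PySem.Int.floordiv leaf_count 4)
    let dev_n := max 1 (leaf_count - prod_n - stor_n)
    let labels :=
      (PySem.List.pyRange 1 (prod_n + 1) 1).map (fun i => pvFmt "PROD" i)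
      ++ (PySem.List.pyRange 1 (stor_n + 1) 1).map (fun i => pvFmt "STOR" i)
      ++ (PySem.List.pyRange 1 (dev_n + 1) 1).map (fun i => pvFmt "DEV" i)
    PySem.List.slice (padLoopA leaf_count labels) none (some leaf_count)

-- ===== PORT B =====
def make_leaf_labels_py_alt (leaf_count : Int) : List String :=
  if leaf_count ≤ 0 then []
  else
    let prod_n := max 1 (leaf_count - PySem.Int.floordiv leaf_count 4 - PySem.Int.floordiv leaf_count 4)
    let stor_n := max 1 (PySem.Int.floordiv leaf_count 4)
    (PySem.List.pyRange 0 leaf_count 1).map (fun j =>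
      if j < prod_n then pvFmt "PROD" (j + 1)
      else if j < prod_n + stor_n then pvFmt "STOR" (j - prod_n + 1)
      else pvFmt "DEV" (j - prod_n - stor_n + 1))

-- ===== PRECONDITION & SPEC =====
def Spec_make_leaf_labels_py (leaf_count : Int) (out : List String) : Prop := out = make_leaf_labels_py_alt leaf_count
instance (leaf_count : Int) (out : List String) : Decidable (Spec_make_leaf_labels_py leaf_count out) := by unfold Spec_make_leaf_labels_py; infer_instance

-- ===== CLAIM (what is proved, stated in full; the proofs are below) =====
def Claim_equal_make_leaf_labels_py : Prop := ∀ (leaf_count : Int), Dom_make_leaf_labels_py leaf_count → Spec_make_leaf_labels_py leaf_count (make_leaf_labels_py leaf_count)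

-- ===== LEMMAS AND PROOFS =====

-- generic take/map-concat lemma
theorem pv_take_concat (p s d n : Int) (hp : 1 ≤ p) (hs : 1 ≤ s) (hd : 1 ≤ d)
    (htot : n ≤ p + s + d) :
    ((List.range p.toNat).map (fun (k : Nat) => pvFmt "PROD" (1 + (k : Int)))
      ++ (List.range s.toNat).map (fun (k : Nat) => pvFmt "STOR" (1 + (k : Int)))
      ++ (List.range d.toNat).map (fun (k : Nat) => pvFmt "DEV" (1 + (k : Int)))).take n.toNat
    = (List.range n.toNat).map (fun (k : Nat) =>
        if (0 + (k : Int)) < p then pvFmt "PROD" (0 + (k : Int) + 1)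
        else if (0 + (k : Int)) < p + s then pvFmt "STOR" (0 + (k : Int) - p + 1)
        else pvFmt "DEV" (0 + (k : Int) - p - s + 1)) := by
  apply List.ext_getElem
  · simp; omega
  · intro k h1 h2
    simp only [List.length_map, List.length_range] at h2
    simp only [List.getElem_take, List.getElem_map, List.getElem_range]
    by_cases hk2 : k < p.toNat + s.toNat
    · rw [List.getElem_append_left (by simp only [List.length_append, List.length_map, List.length_range]; omega)]
      by_cases hk1 : k < p.toNat
      · rw [List.getElem_append_left (by simpa using hk1)]
        simp only [List.getElem_map, List.getElem_range]
        rw [if_pos (by omega)]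
        congr 1; omega
      · rw [List.getElem_append_right (by simpa using hk1)]
        simp only [List.length_map, List.length_range, List.getElem_map, List.getElem_range]
        rw [if_neg (by omega), if_pos (by omega)]
        congr 1
        have hpk : p.toNat ≤ k := by omega
        push_cast [Nat.cast_sub hpk]
        omega
    · rw [List.getElem_append_right (by simp only [List.length_append, List.length_map, List.length_range]; omega)]
      simp only [List.length_append, List.length_map, List.length_range, List.getElem_map, List.getElem_range]
      rw [if_neg (by omega), if_neg (by omega)]
      congr 1
      have hpk : p.toNat + s.toNat ≤ k := by omega
      push_cast [Nat.cast_sub hpk]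
      omega

theorem pv_main (n : Int) : make_leaf_labels_py n = make_leaf_labels_py_alt n := by
  by_cases hn : n ≤ 0
  · simp [make_leaf_labels_py, make_leaf_labels_py_alt, hn]
  · unfold make_leaf_labels_py make_leaf_labels_py_alt
    rw [if_neg hn, if_neg hn]
    dsimp only
    have hq : PySem.Int.floordiv n 4 = n / 4 :=
      PySem.Int.floordiv_eq_ediv_of_pos (by omega)
    rw [hq]
    set q := n / 4 with hqdef
    set p := max 1 (n - q - q) with hpdef
    set s := max 1 q with hsdef
    set d := max 1 (n - p - s) with hddef
    have hp : 1 ≤ p := by omega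
    have hs : 1 ≤ s := by omega
    have hd : 1 ≤ d := by omega
    have htot : n ≤ p + s + d := by omega
    rw [padLoopA.eq_def]
    rw [if_neg (by
      simp only [List.length_append, List.length_map, PySem.List.length_pyRange_one]
      omega)]
    rw [PySem.List.slice_to _ (show (0:Int) ≤ n by omega)]
    rw [PySem.List.pyRange_one, PySem.List.pyRange_one, PySem.List.pyRange_one,
        PySem.List.pyRange_one]
    simp only [add_sub_cancel_right, sub_zero, List.map_map]
    have := pv_take_concat p s d n hp hs hd htot
    simpa [Function.comp] using this

-- ===== VERDICT (by name: the statement is the Claim_ definition above) =====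
theorem make_leaf_labels_py_spec : Claim_equal_make_leaf_labels_py := by
  intro n _
  unfold Spec_make_leaf_labels_py
  exact pv_main n
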